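-- pv_equiv track=rewrite | github.com/KatFaye/ctructure | scripts/preprocessing.py | get_next_token
-- ===== SOURCE A (Python) =====
-- def get_next_token(doc_file, line_i, token_i):
--   # FUnction has a bug. Consider using "line_exists() func" above
--   """Get the next token in the doc_file (list)
--   line_i -- current line index
--   token_i -- current token index
--   """
--   if len(doc_file[line_i].split()) > token_i + 1:
--     return doc_file[line_i].split()[token_i + 1], line_i, token_i + 1
--
--   else:
--     if len(doc_file) > line_i + 1:
--       if len(doc_file[line_i + 1].split()) > 0:
--         return doc_file[line_i + 1].split()[0], line_i + 1, 0
--       else: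
--         # if the next line is empty, we run the function recursively.
--         return get_next_token(doc_file, line_i + 1, 0)
--     # if we have reached the last token of the document.
--     # THE RIGHT SIDE OF THE "AND" OPERATOR HAS A BUG.
--     # MAY BE TO THE ZERO in the recursive call.
--     if len(doc_file) == line_i + 1 and len(doc_file[line_i].split()) == token_i + 1:
--       return
-- ===== SOURCE B (Python) =====
-- def get_next_token(doc_file, line_i, token_i):
--     """Get the next token in the doc_file (list) -- flat iterative scan."""
--     tokens = doc_file[line_i].split()
--     if len(tokens) > token_i + 1:
--         return tokens[token_i + 1], line_i, token_i + 1
--     n = len(doc_file)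
--     j = line_i + 1
--     while j < n:
--         tokens = doc_file[j].split()
--         if tokens:
--             return tokens[0], j, 0
--         j += 1
--     return None
-- ===== Notes on version B (the rewrite author's own statement) =====
-- stated objective: simpler
-- what changed: Replaces A's nested if/else with recursive descent through empty lines by a single flat while-loop scanning forward to the first non-empty line.
import Mathlib
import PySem

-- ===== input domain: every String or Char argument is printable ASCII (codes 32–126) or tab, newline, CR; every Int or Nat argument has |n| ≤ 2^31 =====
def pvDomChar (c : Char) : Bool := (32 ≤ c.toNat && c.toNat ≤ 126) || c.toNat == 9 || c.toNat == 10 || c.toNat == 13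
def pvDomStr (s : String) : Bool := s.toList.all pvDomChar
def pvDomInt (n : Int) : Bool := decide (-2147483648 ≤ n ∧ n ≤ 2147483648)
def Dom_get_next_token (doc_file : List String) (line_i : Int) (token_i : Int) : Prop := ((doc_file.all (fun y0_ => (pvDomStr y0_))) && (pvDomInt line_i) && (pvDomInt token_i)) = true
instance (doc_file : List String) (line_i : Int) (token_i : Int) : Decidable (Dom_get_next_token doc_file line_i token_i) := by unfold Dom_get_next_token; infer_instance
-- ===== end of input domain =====

-- B replaces A's recursive empty-line descent by one flat forward while-loop (objective: simpler).


-- ===== PORT A =====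
def get_next_token (doc_file : List String) (line_i : Int) (token_i : Int) : Option (String × Int × Int) :=
  match PySem.List.pyGet? doc_file line_i with
  | none => none  -- IndexError (excluded by Pre_)
  | some line =>
    let toks := PySem.Str.split₀ line
    if (toks.length : Int) > token_i + 1 then
      match PySem.List.pyGet? toks (token_i + 1) with
      | none => none  -- IndexError (excluded by Pre_)
      | some t => some (t, line_i, token_i + 1)
    else
      if _h : (doc_file.length : Int) > line_i + 1 then
        match PySem.List.pyGet? doc_file (line_i + 1) with
        | none => none  -- unreachable under Pre_
        | some nline =>
          if ((PySem.Str.split₀ nline).length : Int) > 0 then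
            match PySem.List.pyGet? (PySem.Str.split₀ nline) 0 with
            | none => none
            | some t => some (t, line_i + 1, 0)
          else
            get_next_token doc_file (line_i + 1) 0
      else
        -- final 'if … and …: return' — returns None either way
        if (doc_file.length : Int) = line_i + 1 ∧ (toks.length : Int) = token_i + 1 then none
        else none
termination_by ((doc_file.length : Int) - line_i).toNat
decreasing_by omega

-- ===== PORT B =====
-- B's while-loop: scan j forward while j < n for the first non-empty line
def gnt_scan (doc_file : List String) (n : Int) (j : Int) : Option (String × Int × Int) :=
  if _h : j < n then
    match PySem.List.pyGet? doc_file j with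
    | none => none  -- IndexError (unreachable under Pre_)
    | some line =>
      match PySem.Str.split₀ line with
      | [] => gnt_scan doc_file n (j + 1)
      | t :: _ => some (t, j, 0)
  else none
termination_by (n - j).toNat
decreasing_by omega

def get_next_token_alt (doc_file : List String) (line_i : Int) (token_i : Int) : Option (String × Int × Int) :=
  match PySem.List.pyGet? doc_file line_i with
  | none => none  -- IndexError (excluded by Pre_)
  | some line =>
    let toks := PySem.Str.split₀ line
    if (toks.length : Int) > token_i + 1 then
      match PySem.List.pyGet? toks (token_i + 1) with
      | none => none  -- IndexError (excluded by Pre_)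
      | some t => some (t, line_i, token_i + 1)
    else
      gnt_scan doc_file doc_file.length (line_i + 1)

-- ===== PRECONDITION & SPEC =====
-- Pre_ excludes exactly the IndexErrors of the Python: line_i outside Python index range of
-- doc_file, and a very negative token_i for which tokens[token_i+1] is below -len(tokens).
def Pre_get_next_token (doc_file : List String) (line_i : Int) (token_i : Int) : Prop :=
  PySem.Raise.InRange doc_file.length line_i ∧
  -(((PySem.Str.split₀ ((PySem.List.pyGet? doc_file line_i).getD "")).length : Int)) ≤ token_i + 1
instance (doc_file : List String) (line_i : Int) (token_i : Int) : Decidable (Pre_get_next_token doc_file line_i token_i) := by unfold Pre_get_next_token; infer_instance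
def pvWitness_get_next_token : List String × Int × Int := (["a b", "", "c"], 0, 0)

def Spec_get_next_token (doc_file : List String) (line_i : Int) (token_i : Int) (out : Option (String × Int × Int)) : Prop := out = get_next_token_alt doc_file line_i token_i
instance (doc_file : List String) (line_i : Int) (token_i : Int) (out : Option (String × Int × Int)) : Decidable (Spec_get_next_token doc_file line_i token_i out) := by unfold Spec_get_next_token; infer_instance

-- ===== CLAIM (what is proved, stated in full; the proofs are below) =====
def Claim_equal_get_next_token : Prop := ∀ (doc_file : List String) (line_i : Int) (token_i : Int), Dom_get_next_token doc_file line_i token_i → Pre_get_next_token doc_file line_i token_i → Spec_get_next_token doc_file line_i token_i (get_next_token doc_file line_i token_i)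

-- ===== LEMMAS AND PROOFS =====

lemma gnt_agree (doc_file : List String) :
    ∀ (k : Nat) (line_i token_i : Int),
      ((doc_file.length : Int) - line_i).toNat ≤ k →
      Pre_get_next_token doc_file line_i token_i →
      get_next_token doc_file line_i token_i = get_next_token_alt doc_file line_i token_i := by
  intro k
  induction k with
  | zero =>
    intro line_i token_i hk hpre
    obtain ⟨hin, -⟩ := hpre
    simp only [PySem.Raise.InRange] at hin
    omega
  | succ k ih =>
    intro line_i token_i hk hpre
    obtain ⟨hin, htok⟩ := hpre
    have hin' := hin
    simp only [PySem.Raise.InRange] at hin'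
    obtain ⟨line, hline⟩ : ∃ l, PySem.List.pyGet? doc_file line_i = some l := by
      cases h : PySem.List.pyGet? doc_file line_i with
      | none => exact absurd ((PySem.List.pyGet?_eq_none_iff _ _).mp h) (fun c => c hin)
      | some l => exact ⟨l, rfl⟩
    rw [get_next_token, get_next_token_alt]
    simp only [hline]
    by_cases hg : (((PySem.Str.split₀ line).length : Int) > token_i + 1)
    · simp only [if_pos hg]
    · simp only [if_neg hg]
      rw [gnt_scan]
      by_cases hnext : ((doc_file.length : Int) > line_i + 1)
      · obtain ⟨nline, hnline⟩ : ∃ l, PySem.List.pyGet? doc_file (line_i + 1) = some l := by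
          cases h : PySem.List.pyGet? doc_file (line_i + 1) with
          | none =>
            rw [PySem.List.pyGet?_eq_none_iff] at h
            exact absurd (by constructor <;> omega) h
          | some l => exact ⟨l, rfl⟩
        rw [dif_pos hnext, dif_pos hnext]
        simp only [hnline]
        cases hsp : PySem.Str.split₀ nline with
        | nil =>
          simp only [List.length_nil]
          rw [if_neg (by omega)]
          have hpre' : Pre_get_next_token doc_file (line_i + 1) 0 := by
            refine ⟨⟨by omega, by omega⟩, ?_⟩
            simp [hnline, hsp]
          have := ih (line_i + 1) 0 (by omega) hpre'
          rw [this, get_next_token_alt]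
          simp only [hnline, hsp, List.length_nil]
          rw [if_neg (by omega)]
        | cons t rest =>
          simp only [List.length_cons]
          rw [if_pos (by push_cast; omega)]
          simp
      · rw [dif_neg hnext, dif_neg hnext]
        split <;> rfl

theorem get_next_token_spec : Claim_equal_get_next_token := by
  intro doc_file line_i token_i _hd hpre
  exact gnt_agree doc_file ((doc_file.length : Int) - line_i).toNat line_i token_i le_rfl hpre
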